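-- pv_equiv track=rewrite | github.com/yanny2five/paperfile-web | modules/report_year_utils.py | extract_year_int
-- ===== SOURCE A (Python) =====
-- def extract_year_int(val) -> int | None:
--     """Extract a 4-digit year from strings like 'September/October 2016'."""
--     s = "" if val is None else str(val).strip()
--     if not s:
--         return None
--     digits = "".join(ch for ch in s if ch.isdigit())
--     if len(digits) >= 4:
--         try:
--             return int(digits[-4:])
--         except ValueError:
--             return None
--     return None
-- ===== SOURCE B (Python) =====
-- def extract_year_int(val) -> int | None:
--     """Extract a 4-digit year: early-terminating reverse scan instead of filtering the whole string."""
--     s = "" if val is None else str(val).strip()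
--     if not s:
--         return None
--     buf = []
--     for ch in reversed(s):
--         if ch.isdigit():
--             buf.append(ch)
--             if len(buf) == 4:
--                 break
--     if len(buf) < 4:
--         return None
--     buf.reverse()
--     return int("".join(buf))
-- ===== Notes on version B (the rewrite author's own statement) =====
-- stated objective: alternative
-- what changed: Replaces 'filter all digits into a string, then slice its last 4' with a reverse scan that collects at most 4 digits and stops early, so no full digit string is ever built.
import Mathlib
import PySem

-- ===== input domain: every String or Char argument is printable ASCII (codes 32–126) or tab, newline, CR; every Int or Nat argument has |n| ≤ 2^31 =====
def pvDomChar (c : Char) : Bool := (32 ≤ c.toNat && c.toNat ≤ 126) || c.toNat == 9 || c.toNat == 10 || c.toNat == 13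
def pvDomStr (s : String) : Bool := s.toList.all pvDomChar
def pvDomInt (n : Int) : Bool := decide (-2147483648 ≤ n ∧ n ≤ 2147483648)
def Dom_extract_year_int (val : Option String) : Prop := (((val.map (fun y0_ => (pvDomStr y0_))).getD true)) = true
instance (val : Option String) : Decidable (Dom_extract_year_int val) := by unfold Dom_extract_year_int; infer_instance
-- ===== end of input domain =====

-- B changes the algorithm: an early-terminating reverse scan collecting at most 4 digits,
-- instead of filtering every digit into a string and slicing its last 4.

-- ===== PORT A =====
def extract_year_int (val : Option String) : Option Int :=
  let s := match val with
    | none => ""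
    | some v => PySem.Str.strip v
  if s = "" then none
  else
    let digits := s.toList.filter (fun ch => PySem.Chars.isdigit ch)
    if 4 ≤ digits.length then
      match PySem.Int.ofChars? (PySem.List.slice digits (some (-4)) none) with
      | some n => some n
      | none => none          -- except ValueError: return None
    else none

-- ===== PORT B =====
-- the 'for ch in reversed(s): … break' loop of Source B (structural recursion over the reversed chars)
def pvCollect4 : List Char → List Char → List Char
  | [], buf => buf
  | ch :: rest, buf =>
      if PySem.Chars.isdigit ch then
        let buf' := buf ++ [ch]
        if buf'.length = 4 then buf' else pvCollect4 rest buf'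
      else pvCollect4 rest buf

def extract_year_int_alt (val : Option String) : Option Int :=
  let s := match val with
    | none => ""
    | some v => PySem.Str.strip v
  if s = "" then none
  else
    let buf := pvCollect4 s.toList.reverse []
    if buf.length < 4 then none
    else PySem.Int.ofChars? buf.reverse

-- ===== PRECONDITION & SPEC =====
def Spec_extract_year_int (val : Option String) (out : Option Int) : Prop := out = extract_year_int_alt val
instance (val : Option String) (out : Option Int) : Decidable (Spec_extract_year_int val out) := by unfold Spec_extract_year_int; infer_instance

-- ===== CLAIM (what is proved, stated in full; the proofs are below) =====
def Claim_equal_extract_year_int : Prop := ∀ (val : Option String), Dom_extract_year_int val → Spec_extract_year_int val (extract_year_int val)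

-- ===== LEMMAS AND PROOFS =====

-- the loop collects exactly the first 4 digits of its input (given a buffer still below 4)
theorem pvCollect4_eq (l buf : List Char) (h : buf.length < 4) :
    pvCollect4 l buf = (buf ++ l.filter (fun ch => PySem.Chars.isdigit ch)).take 4 := by
  induction l generalizing buf with
  | nil => simp [pvCollect4]; omega
  | cons ch rest ih =>
    simp only [pvCollect4]
    by_cases hd : PySem.Chars.isdigit ch
    · simp only [hd, if_true]
      by_cases h4 : (buf ++ [ch]).length = 4
      · simp only [h4, if_true, List.filter_cons, hd]
        rw [show buf ++ (ch :: List.filter (fun ch => PySem.Chars.isdigit ch) rest)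
              = (buf ++ [ch]) ++ List.filter (fun ch => PySem.Chars.isdigit ch) rest by simp,
            List.take_append_of_le_length (by omega), ← h4, List.take_length]
      · rw [if_neg h4, ih _ (by simp at h4 ⊢; omega)]
        simp [hd]
    · simp only [hd, if_false, Bool.false_eq_true, ih _ h]
      simp [hd]

-- ===== VERDICT (by name: the statement is the Claim_ definition above) =====
theorem extract_year_int_spec : Claim_equal_extract_year_int := by
  intro val _
  unfold Spec_extract_year_int extract_year_int extract_year_int_alt
  cases val with
  | none => rfl
  | some v =>
    by_cases hs : PySem.Str.strip v = ""
    · rw [if_pos hs, if_pos hs]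
    · rw [if_neg hs, if_neg hs]
      rw [pvCollect4_eq _ [] (by simp)]
      rw [show (PySem.Str.strip v).toList.reverse.filter (fun ch => PySem.Chars.isdigit ch)
            = ((PySem.Str.strip v).toList.filter (fun ch => PySem.Chars.isdigit ch)).reverse
          from List.filter_reverse]
      generalize (PySem.Str.strip v).toList.filter (fun ch => PySem.Chars.isdigit ch) = ds
      simp only [List.nil_append, List.take_reverse, List.reverse_reverse, List.length_reverse, List.length_drop]
      by_cases h4 : 4 ≤ ds.length
      · rw [if_pos h4, if_neg (by omega),
            PySem.List.slice_from_neg_ofNat ds 4 (by omega)]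
        cases PySem.Int.ofChars? (ds.drop (ds.length - 4)) <;> simp
      · rw [if_neg h4, if_pos (by omega)]
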